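-- pv_equiv track=rewrite | github.com/KovanB/unity-reskin-pipeline | unity_reskin/consistency.py | group_assets
-- ===== SOURCE A (Python) =====
-- from collections import defaultdict
--
-- ASSET_GROUPS = {
--     "character": ["character", "player", "avatar", "skin", "hero", "runner"],
--     "track": ["track", "rail", "road", "ground", "floor", "path"],
--     "building": ["building", "house", "shop", "wall", "roof", "structure"],
--     "nature": ["tree", "grass", "leaf", "flower", "bush", "plant"],
--     "vehicle": ["train", "car", "bus", "truck", "vehicle"],
--     "collectible": ["coin", "gem", "star", "powerup", "item", "pickup"],
--     "ui": ["button", "panel", "frame", "border", "icon", "hud", "menu"],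
--     "sky": ["sky", "cloud", "background", "backdrop"],
-- }
--
-- def group_assets(assets):
--     groups = defaultdict(list)
--     for asset in assets:
--         rel = asset.get("relative_path", "").lower()
--         assigned = False
--         for group_name, keywords in ASSET_GROUPS.items():
--             if any(kw in rel for kw in keywords):
--                 groups[group_name].append(asset)
--                 assigned = True
--                 break
--         if not assigned:
--             groups["other"].append(asset)
--     return dict(groups)
-- ===== SOURCE B (Python) =====
-- ASSET_GROUPS = {
--     "character": ["character", "player", "avatar", "skin", "hero", "runner"],
--     "track": ["track", "rail", "road", "ground", "floor", "path"],
--     "building": ["building", "house", "shop", "wall", "roof", "structure"],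
--     "nature": ["tree", "grass", "leaf", "flower", "bush", "plant"],
--     "vehicle": ["train", "car", "bus", "truck", "vehicle"],
--     "collectible": ["coin", "gem", "star", "powerup", "item", "pickup"],
--     "ui": ["button", "panel", "frame", "border", "icon", "hud", "menu"],
--     "sky": ["sky", "cloud", "background", "backdrop"],
-- }
--
-- def group_assets(assets):
--     # Pass 0: lowercase each relative path once.
--     rels = [asset.get("relative_path", "").lower() for asset in assets]
--     # Pass 1: groups in priority order claim asset indices.
--     claimed = {}
--     for name, keywords in ASSET_GROUPS.items():
--         for i, rel in enumerate(rels):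
--             if i not in claimed and any(kw in rel for kw in keywords):
--                 claimed[i] = name
--     # Pass 2: emit assets in original order under their claimed group (or "other").
--     result = {}
--     for i, asset in enumerate(assets):
--         result.setdefault(claimed.get(i, "other"), []).append(asset)
--     return result
-- ===== Notes on version B (the rewrite author's own statement) =====
-- stated objective: alternative
-- what changed: Inverts the loop nesting: groups in priority order claim asset indices in a first pass over precomputed lowercased paths, then a second pass over the assets rebuilds the dict in original asset/first-claim order; A instead classifies each asset in one nested loop with a break.
import Mathlib
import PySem

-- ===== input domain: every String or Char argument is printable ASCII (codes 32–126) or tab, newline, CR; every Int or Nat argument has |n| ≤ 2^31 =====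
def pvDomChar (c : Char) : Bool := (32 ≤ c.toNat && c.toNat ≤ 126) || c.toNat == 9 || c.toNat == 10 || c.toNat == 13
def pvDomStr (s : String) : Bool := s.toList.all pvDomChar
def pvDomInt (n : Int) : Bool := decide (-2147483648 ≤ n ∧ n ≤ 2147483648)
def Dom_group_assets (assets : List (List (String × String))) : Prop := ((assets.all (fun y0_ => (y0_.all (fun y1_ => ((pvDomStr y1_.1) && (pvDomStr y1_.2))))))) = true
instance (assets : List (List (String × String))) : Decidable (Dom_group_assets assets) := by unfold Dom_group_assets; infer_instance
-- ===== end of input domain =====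

-- B inverts the loop nesting (groups claim asset indices, then a rebuild pass); same return value as A, proved below.

-- ===== PORT A =====
-- the module constant ASSET_GROUPS, in its (insertion) order
def agGroups : List (String × List String) :=
  [("character", ["character", "player", "avatar", "skin", "hero", "runner"]),
   ("track", ["track", "rail", "road", "ground", "floor", "path"]),
   ("building", ["building", "house", "shop", "wall", "roof", "structure"]),
   ("nature", ["tree", "grass", "leaf", "flower", "bush", "plant"]),
   ("vehicle", ["train", "car", "bus", "truck", "vehicle"]),
   ("collectible", ["coin", "gem", "star", "powerup", "item", "pickup"]),
   ("ui", ["button", "panel", "frame", "border", "icon", "hud", "menu"]),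
   ("sky", ["sky", "cloud", "background", "backdrop"])]

-- asset.get("relative_path", "").lower()
def agRel (asset : List (String × String)) : String :=
  PySem.Str.lower (PySem.Dict.getD (PySem.Dict.mk asset) "relative_path" "")

-- any(kw in rel for kw in keywords)
def agMatch (rel : String) (kws : List String) : Bool :=
  kws.any (fun kw => PySem.Str.isIn kw rel)

-- A's inner 'for group_name, keywords in ASSET_GROUPS.items(): … break' loop (first match wins)
def agFirst (rel : String) : List (String × List String) → Option String
  | [] => none
  | (name, kws) :: rest => if agMatch rel kws then some name else agFirst rel rest

def group_assets (assets : List (List (String × String))) : List (String × List (List (String × String))) :=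
  (assets.foldl (fun groups asset =>
      match agFirst (agRel asset) agGroups with
      | some name => groups.modify name [] (· ++ [asset])   -- defaultdict: groups[name].append(asset)
      | none => groups.modify "other" [] (· ++ [asset]))
    (PySem.Dict.empty : PySem.Dict String (List (List (String × String))))).items

-- ===== PORT B =====
-- loop body of B's claim sweep: 'if i not in claimed and any(kw in rel for kw in keywords): claimed[i] = name'
def agStep (p : String × List String) (c : PySem.Dict Int String) (q : Int × String) : PySem.Dict Int String :=
  if !c.contains q.1 && agMatch q.2 p.2 then c.insert q.1 p.1 else c

def group_assets_alt (assets : List (List (String × String))) : List (String × List (List (String × String))) :=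
  let rels := assets.map agRel
  let claimed := agGroups.foldl (fun claimed p => (PySem.List.enumerate rels 0).foldl (agStep p) claimed)
    (PySem.Dict.empty : PySem.Dict Int String)
  ((PySem.List.enumerate assets 0).foldl (fun result q =>
      result.modify (claimed.getD q.1 "other") [] (· ++ [q.2]))   -- setdefault(…, []).append(asset)
    (PySem.Dict.empty : PySem.Dict String (List (List (String × String))))).items

-- ===== PRECONDITION & SPEC =====
def Spec_group_assets (assets : List (List (String × String))) (out : List (String × List (List (String × String)))) : Prop := out = group_assets_alt assets
instance (assets : List (List (String × String))) (out : List (String × List (List (String × String)))) : Decidable (Spec_group_assets assets out) := by unfold Spec_group_assets; infer_instance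

-- ===== CLAIM (what is proved, stated in full; the proofs are below) =====
def Claim_equal_group_assets : Prop := ∀ (assets : List (List (String × String))), Dom_group_assets assets → Spec_group_assets assets (group_assets assets)

-- ===== LEMMAS AND PROOFS =====

lemma agFirst_cons (rel : String) (name : String) (kws : List String) (rest : List (String × List String)) :
    agFirst rel ((name, kws) :: rest) = if agMatch rel kws then some name else agFirst rel rest := rfl

-- indices below the enumeration start are untouched by one group's sweep
lemma agStep_get_lt (p : String × List String) (rels : List String) (s j : Int) (hj : j < s)
    (c : PySem.Dict Int String) :
    ((PySem.List.enumerate rels s).foldl (agStep p) c).get? j = c.get? j := by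
  induction rels generalizing s c with
  | nil => simp [PySem.List.enumerate_nil]
  | cons r t ih =>
    rw [PySem.List.enumerate_cons, List.foldl_cons, ih (s + 1) (by omega)]
    unfold agStep
    split
    · exact PySem.Dict.get?_insert_of_ne _ _ (by simp; omega)
    · rfl

-- effect of one group's sweep on the entry of index s + k
lemma agStep_get (p : String × List String) (rels : List String) (s : Int)
    (c : PySem.Dict Int String) (k : Nat) (hk : k < rels.length) :
    ((PySem.List.enumerate rels s).foldl (agStep p) c).get? (s + k) =
      (c.get? (s + k)).or (if agMatch rels[k] p.2 then some p.1 else none) := by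
  induction rels generalizing s c k with
  | nil => simp at hk
  | cons r t ih =>
    rw [PySem.List.enumerate_cons, List.foldl_cons]
    cases k with
    | zero =>
      rw [agStep_get_lt p t (s + 1) _ (by push_cast; omega)]
      by_cases hc : c.contains s
      · have hsome : (c.get? s).isSome := by rw [PySem.Dict.contains_eq_isSome_get?] at hc; exact hc
        rcases hg : c.get? s with _ | v
        · rw [hg] at hsome; simp at hsome
        · simp [agStep, hc, hg]
      · have hg : c.get? s = none := by
          rw [PySem.Dict.contains_eq_isSome_get?] at hc
          rcases h : c.get? s with _ | v
          · rfl
          · rw [h] at hc; simp at hc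
        by_cases hm : agMatch r p.2
        · simp [agStep, hc, hm, hg, PySem.Dict.get?_insert_self]
        · simp [agStep, hc, hm, hg]
    | succ k' =>
      have h1 : s + ((k' + 1 : Nat) : Int) = (s + 1) + (k' : Nat) := by push_cast; ring
      rw [h1, ih (s + 1) (agStep p c (s, r)) k' (by simpa using Nat.lt_of_succ_lt_succ hk)]
      have h2 : (agStep p c (s, r)).get? ((s + 1) + (k' : Nat)) = c.get? ((s + 1) + (k' : Nat)) := by
        unfold agStep
        split
        · exact PySem.Dict.get?_insert_of_ne _ _ (by simp; omega)
        · rfl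
      rw [h2]
      rfl

-- after all groups have swept, index k holds the first group matching rels[k]
lemma agClaimed_get (L : List (String × List String)) (rels : List String)
    (c : PySem.Dict Int String) (k : Nat) (hk : k < rels.length) :
    (L.foldl (fun claimed p => (PySem.List.enumerate rels 0).foldl (agStep p) claimed) c).get? (k : Nat) =
      (c.get? (k : Nat)).or (agFirst rels[k] L) := by
  induction L generalizing c with
  | nil => simp [agFirst]
  | cons p rest ih =>
    rcases p with ⟨name, kws⟩
    rw [List.foldl_cons, ih]
    have h := agStep_get (name, kws) rels 0 c k hk
    have h0 : ((0 : Int) + (k : Nat)) = ((k : Nat) : Int) := by omega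
    rw [h0] at h
    rw [h, agFirst_cons]
    by_cases hm : agMatch rels[k] kws
    · simp [hm]
    · simp [hm]

-- the rebuild pass over enumerate equals A's direct fold, given what claimed holds at each index
lemma agRebuild (claimed : PySem.Dict Int String) (l : List (List (String × String))) (s : Int)
    (h : ∀ (k : Nat), k < l.length → ∀ (hk : k < l.length), claimed.getD (s + k) "other" = (agFirst (agRel l[k]) agGroups).getD "other")
    (d : PySem.Dict String (List (List (String × String)))) :
    (PySem.List.enumerate l s).foldl (fun result q =>
        result.modify (claimed.getD q.1 "other") [] (· ++ [q.2])) d =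
      l.foldl (fun groups asset =>
        match agFirst (agRel asset) agGroups with
        | some name => groups.modify name [] (· ++ [asset])
        | none => groups.modify "other" [] (· ++ [asset])) d := by
  induction l generalizing s d with
  | nil => simp [PySem.List.enumerate_nil]
  | cons a t ih =>
    rw [PySem.List.enumerate_cons, List.foldl_cons, List.foldl_cons]
    have h0 := h 0 (by simp) (by simp)
    simp only [List.getElem_cons_zero] at h0
    have hs0 : s + ((0 : Nat) : Int) = s := by omega
    rw [hs0] at h0
    have hstep : d.modify (claimed.getD s "other") [] (· ++ [a]) =
        (match agFirst (agRel a) agGroups with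
         | some name => d.modify name [] (· ++ [a])
         | none => d.modify "other" [] (· ++ [a])) := by
      rw [h0]; cases agFirst (agRel a) agGroups <;> rfl
    rw [hstep]
    refine ih (s + 1) (fun k hk hk' => ?_) _
    have := h (k + 1) (by simpa using Nat.succ_lt_succ hk) (by simpa using Nat.succ_lt_succ hk)
    simpa [add_assoc, add_comm, add_left_comm, Nat.cast_add] using this

-- ===== VERDICT (by name: the statement is the Claim_ definition above) =====
theorem group_assets_spec : Claim_equal_group_assets := by
  intro assets _
  unfold Spec_group_assets group_assets group_assets_alt
  dsimp only
  have hclaim : ∀ (k : Nat), k < assets.length → ∀ (hk : k < assets.length),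
      ((agGroups.foldl (fun claimed p => (PySem.List.enumerate (assets.map agRel) 0).foldl (agStep p) claimed)
          (PySem.Dict.empty : PySem.Dict Int String)).getD ((0:Int) + (k : Nat)) "other") =
        (agFirst (agRel assets[k]) agGroups).getD "other" := by
    intro k hk _
    have hk' : k < (assets.map agRel).length := by simpa using hk
    have h := agClaimed_get agGroups (assets.map agRel) PySem.Dict.empty k hk'
    have h0 : ((0 : Int) + (k : Nat)) = ((k : Nat) : Int) := by omega
    rw [h0, PySem.Dict.getD_eq_get?_getD, h]
    simp [PySem.Dict.get?_empty]
  rw [agRebuild _ assets 0 hclaim]
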